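-- pv_equiv track=rewrite | github.com/houhuawei23/arxiv2md | src/arxiv2md_beta/network/author_enrichment.py | _dedupe_affiliation_strings
-- ===== SOURCE A (Python) =====
-- def _dedupe_affiliation_strings(parts: list[str]) -> list[str]:
--     """Remove case-insensitive duplicates and shorter strings contained in a longer one."""
--     if not parts:
--         return []
--     seen: set[str] = set()
--     uniq: list[str] = []
--     for p in parts:
--         p = str(p).strip()
--         if not p:
--             continue
--         key = p.lower()
--         if key in seen:
--             continue
--         seen.add(key)
--         uniq.append(p)
--     kept: list[str] = []
--     for p in uniq:
--         pl = p.lower()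
--         redundant = False
--         for q in uniq:
--             if p is q:
--                 continue
--             ql = q.lower()
--             if pl in ql and len(q) > len(p):
--                 redundant = True
--                 break
--         if not redundant:
--             kept.append(p)
--     return kept
-- ===== SOURCE B (Python) =====
-- def _dedupe_affiliation_strings(parts: list[str]) -> list[str]:
--     """Remove case-insensitive duplicates and shorter strings contained in a longer one."""
--     seen: set[str] = set()
--     uniq: list[str] = []
--     for p in parts:
--         p = str(p).strip()
--         if not p:
--             continue
--         key = p.lower()
--         if key in seen:
--             continue
--         seen.add(key)
--         uniq.append(p)
--     # Containment filter: scan longest-first, checking each string only against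
--     # already-kept survivors (transitivity makes this equal to checking all pairs).
--     survivors: list[str] = []
--     for p in sorted(uniq, key=len, reverse=True):
--         pl = p.lower()
--         if not any(pl in q.lower() and len(q) > len(p) for q in survivors):
--             survivors.append(p)
--     return [p for p in uniq if p in survivors]
-- ===== Notes on version B (the rewrite author's own statement) =====
-- stated objective: alternative
-- what changed: The all-pairs containment scan over uniq is replaced by a longest-first pass that checks each string only against already-kept survivors (transitivity of substring containment makes this equivalent), with the result reordered back to uniq's original order.
import Mathlib
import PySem

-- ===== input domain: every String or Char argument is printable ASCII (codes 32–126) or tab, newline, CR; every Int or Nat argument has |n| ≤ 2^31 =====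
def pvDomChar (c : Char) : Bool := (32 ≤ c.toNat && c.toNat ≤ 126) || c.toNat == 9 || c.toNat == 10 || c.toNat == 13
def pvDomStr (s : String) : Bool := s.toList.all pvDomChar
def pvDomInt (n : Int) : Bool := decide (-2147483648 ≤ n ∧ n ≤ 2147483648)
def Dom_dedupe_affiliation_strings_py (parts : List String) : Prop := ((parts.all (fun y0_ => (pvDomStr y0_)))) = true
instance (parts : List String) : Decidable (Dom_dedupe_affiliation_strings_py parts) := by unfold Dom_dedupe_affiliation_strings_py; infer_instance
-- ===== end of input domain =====

-- B replaces A's all-pairs containment scan over uniq by a longest-first scan that checks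
-- each string only against already-kept survivors (objective: alternative; same results).

-- first pass (identical source code in Source A and Source B): strip, drop empties, dedup by lowercase key
def pvStripLoop (parts : List String) : PySem.Set String × List String :=
  parts.foldl (fun st p0 =>
      let p := PySem.Str.strip p0
      if p == "" then st
      else
        let key := PySem.Str.lower p
        if st.1.contains key then st
        else (st.1.add key, st.2 ++ [p]))
    (PySem.Set.empty, [])

-- ===== PORT A =====
-- 'p is q' (object identity) is ported as value equality p == q: uniq never holds two equal
-- strings (lowercase keys are distinct), so the two tests coincide on every reachable pair.
def dedupe_affiliation_strings_py (parts : List String) : List String :=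
  if parts = [] then []
  else
    let uniq := (pvStripLoop parts).2
    uniq.foldl (fun kept p =>
      let pl := PySem.Str.lower p
      let redundant := uniq.any (fun q =>
        !(p == q) && (PySem.Str.isIn pl (PySem.Str.lower q) && decide (PySem.Str.len q > PySem.Str.len p)))
      if redundant then kept else kept ++ [p]) []

-- ===== PORT B =====
def dedupe_affiliation_strings_py_alt (parts : List String) : List String :=
  let uniq := (pvStripLoop parts).2
  let survivors := (PySem.List.sorted uniq (fun s => PySem.Str.len s) true).foldl
    (fun surv p =>
      let pl := PySem.Str.lower p
      if surv.any (fun q => PySem.Str.isIn pl (PySem.Str.lower q) && decide (PySem.Str.len q > PySem.Str.len p))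
      then surv
      else surv ++ [p]) []
  uniq.filter (fun p => survivors.contains p)

-- ===== PRECONDITION & SPEC =====
def Spec_dedupe_affiliation_strings_py (parts : List String) (out : List String) : Prop := out = dedupe_affiliation_strings_py_alt parts
instance (parts : List String) (out : List String) : Decidable (Spec_dedupe_affiliation_strings_py parts out) := by unfold Spec_dedupe_affiliation_strings_py; infer_instance

-- ===== CLAIM (what is proved, stated in full; the proofs are below) =====
def Claim_equal_dedupe_affiliation_strings_py : Prop := ∀ (parts : List String), Dom_dedupe_affiliation_strings_py parts → Spec_dedupe_affiliation_strings_py parts (dedupe_affiliation_strings_py parts)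

-- ===== LEMMAS AND PROOFS =====

-- 'q strictly dominates p': p's lowercase is a substring of q's lowercase and q is longer
def pvBeats (p q : String) : Bool :=
  PySem.Str.isIn (PySem.Str.lower p) (PySem.Str.lower q) && decide (PySem.Str.len q > PySem.Str.len p)

theorem pvBeats_irrefl (p : String) : pvBeats p p = false := by
  simp [pvBeats]

theorem pvBeats_trans {p q r : String} (h1 : pvBeats p q = true) (h2 : pvBeats q r = true) :
    pvBeats p r = true := by
  simp only [pvBeats, Bool.and_eq_true, decide_eq_true_eq, PySem.Str.isIn_iff_infix] at *
  exact ⟨h1.1.trans h2.1, lt_trans h1.2 h2.2⟩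

theorem pvBeats_len {p q : String} (h : pvBeats p q = true) :
    PySem.Str.len p < PySem.Str.len q := by
  simp only [pvBeats, Bool.and_eq_true, decide_eq_true_eq] at h
  exact h.2

-- a dominated element has a dominator that is itself undominated (pick one of maximal length)
theorem pvExists_undom_dominator (L : List String) (p : String)
    (h : L.any (fun q => pvBeats p q) = true) :
    ∃ q ∈ L, pvBeats p q = true ∧ L.any (fun r => pvBeats q r) = false := by
  classical
  set D := L.filter (fun q => pvBeats p q) with hD
  have hne : D ≠ [] := by
    simp only [List.any_eq_true] at h
    obtain ⟨q, hq, hdq⟩ := h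
    intro hnil
    have : q ∈ D := by simp [hD, List.mem_filter, hq, hdq]
    simp [hnil] at this
  obtain ⟨q, hq⟩ : ∃ q, q ∈ D.argmax PySem.Str.len := by
    cases hmq : D.argmax PySem.Str.len with
    | none => exact absurd (List.argmax_eq_none.mp hmq) hne
    | some q => exact ⟨q, by rfl⟩
  have hqD : q ∈ D := List.argmax_mem hq
  have hqL : q ∈ L := (List.mem_filter.mp hqD).1
  have hqdom : pvBeats p q = true := (List.mem_filter.mp hqD).2
  refine ⟨q, hqL, hqdom, ?_⟩
  by_contra hany
  rw [Bool.not_eq_false, List.any_eq_true] at hany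
  obtain ⟨r, hrL, hqr⟩ := hany
  have hrD : r ∈ D := List.mem_filter.mpr ⟨hrL, pvBeats_trans hqdom hqr⟩
  have := List.le_of_mem_argmax hrD hq
  exact absurd (pvBeats_len hqr) (not_lt.mpr this)

-- the containment predicate both programs decide, relative to the full uniq list
def pvUndom (uniq : List String) (p : String) : Bool := !(uniq.any (fun q => pvBeats p q))

-- B's survivor loop over the length-descending list computes uniq.filter (pvUndom uniq)
theorem pvSurvLoop (uniq : List String) :
    ∀ (rest pre : List String),
      (pre ++ rest).Perm uniq →
      (pre ++ rest).Pairwise (fun a b => PySem.Str.len b ≤ PySem.Str.len a) →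
      rest.foldl (fun surv p => if surv.any (fun q => pvBeats p q) then surv else surv ++ [p])
          (pre.filter (pvUndom uniq))
        = (pre ++ rest).filter (pvUndom uniq) := by
  intro rest
  induction rest with
  | nil => intro pre _ _; simp
  | cons p rest' ih =>
    intro pre hperm hpair
    have hkey : ((pre.filter (pvUndom uniq)).any (fun q => pvBeats p q)) = uniq.any (fun q => pvBeats p q) := by
      by_cases h : uniq.any (fun q => pvBeats p q) = true
      · rw [h]
        obtain ⟨q, hqU, hpq, hqundom⟩ := pvExists_undom_dominator uniq p h
        have hqmem : q ∈ pre ++ p :: rest' := hperm.mem_iff.mpr hqU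
        have hqpre : q ∈ pre := by
          rcases List.mem_append.mp hqmem with hq | hq
          · exact hq
          · rcases List.mem_cons.mp hq with rfl | hq
            · exact absurd hpq (by simp [pvBeats_irrefl])
            · have := (List.pairwise_append.mp hpair).2.1
              have hle : PySem.Str.len q ≤ PySem.Str.len p := (List.rel_of_pairwise_cons this) hq
              exact absurd (pvBeats_len hpq) (not_lt.mpr hle)
        rw [List.any_eq_true]
        exact ⟨q, List.mem_filter.mpr ⟨hqpre, by simp [pvUndom, hqundom]⟩, hpq⟩
      · rw [Bool.not_eq_true] at h
        rw [h, Bool.eq_false_iff]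
        intro hany
        rw [List.any_eq_true] at hany
        obtain ⟨q, hqf, hpq⟩ := hany
        have hqU : q ∈ uniq := hperm.mem_iff.mp (List.mem_append_left _ (List.mem_filter.mp hqf).1)
        have : uniq.any (fun r => pvBeats p r) = true := List.any_eq_true.mpr ⟨q, hqU, hpq⟩
        simp [h] at this
    have hassoc : pre ++ p :: rest' = (pre ++ [p]) ++ rest' := by simp
    simp only [List.foldl_cons, hkey]
    by_cases h : uniq.any (fun q => pvBeats p q) = true
    · have hundom : pvUndom uniq p = false := by simp [pvUndom, h]
      rw [h, if_pos rfl]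
      have hstep : pre.filter (pvUndom uniq) = (pre ++ [p]).filter (pvUndom uniq) := by
        simp [List.filter_append, hundom]
      rw [hstep, hassoc]
      exact ih (pre ++ [p]) (by rwa [← hassoc]) (by rwa [← hassoc])
    · rw [Bool.not_eq_true] at h
      have hundom : pvUndom uniq p = true := by simp [pvUndom, h]
      rw [h, if_neg (by simp)]
      have hstep : pre.filter (pvUndom uniq) ++ [p] = (pre ++ [p]).filter (pvUndom uniq) := by
        simp [List.filter_append, hundom]
      rw [hstep, hassoc]
      exact ih (pre ++ [p]) (by rwa [← hassoc]) (by rwa [← hassoc])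

-- A's inner predicate (with the ported identity skip) is exactly pvBeats: the skip only
-- drops the q = p case, where pvBeats is false anyway
theorem pvA_foldfun (uniq : List String) :
    (fun (kept : List String) p =>
      if uniq.any (fun q =>
          !(p == q) && (PySem.Str.isIn (PySem.Str.lower p) (PySem.Str.lower q)
            && decide (PySem.Str.len q > PySem.Str.len p)))
      then kept else kept ++ [p])
    = (fun (kept : List String) p =>
        if uniq.any (fun q => pvBeats p q) then kept else kept ++ [p]) := by
  funext kept p
  have hpred : (fun q =>
      !(p == q) && (PySem.Str.isIn (PySem.Str.lower p) (PySem.Str.lower q)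
        && decide (PySem.Str.len q > PySem.Str.len p)))
      = (fun q => pvBeats p q) := by
    funext q
    by_cases h : p = q
    · subst h; simp [pvBeats]
    · simp [pvBeats, h]
  rw [hpred]

-- A's kept-loop is a filter
theorem pvA_filter (uniq : List String) :
    (uniq.foldl (fun kept p =>
        if uniq.any (fun q =>
            !(p == q) && (PySem.Str.isIn (PySem.Str.lower p) (PySem.Str.lower q)
              && decide (PySem.Str.len q > PySem.Str.len p)))
        then kept else kept ++ [p]) [])
      = uniq.filter (pvUndom uniq) := by
  rw [pvA_foldfun]
  have h : ∀ (l acc : List String),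
      (l.foldl (fun kept p =>
        if uniq.any (fun q => pvBeats p q) then kept else kept ++ [p]) acc)
        = acc ++ l.filter (pvUndom uniq) := by
    intro l
    induction l with
    | nil => simp
    | cons p l ih =>
      intro acc
      simp only [List.foldl_cons]
      by_cases h : uniq.any (fun q => pvBeats p q) = true
      · rw [if_pos h, ih]
        simp [pvUndom, h]
      · rw [Bool.not_eq_true] at h
        rw [if_neg (by simp [h]), ih]
        simp [pvUndom, h]
  simpa using h uniq []

-- ===== VERDICT (by name: the statement is the Claim_ definition above) =====
theorem dedupe_affiliation_strings_py_spec : Claim_equal_dedupe_affiliation_strings_py := by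
  intro parts _
  unfold Spec_dedupe_affiliation_strings_py dedupe_affiliation_strings_py dedupe_affiliation_strings_py_alt
  by_cases hp : parts = []
  · subst hp; rfl
  · rw [if_neg hp]
    set uniq := (pvStripLoop parts).2 with huniq
    have hsurv := pvSurvLoop uniq (PySem.List.sorted uniq (fun s => PySem.Str.len s) true) []
      (by simpa using PySem.List.sorted_perm uniq (fun s => PySem.Str.len s) true)
      (by simpa using PySem.List.sorted_pairwise_rev uniq (fun s => PySem.Str.len s))
    simp only [List.filter_nil, List.nil_append] at hsurv
    have hfun2 : (fun (surv : List String) p =>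
        if surv.any (fun q => PySem.Str.isIn (PySem.Str.lower p) (PySem.Str.lower q)
            && decide (PySem.Str.len q > PySem.Str.len p))
        then surv else surv ++ [p])
      = (fun (surv : List String) p =>
          if surv.any (fun q => pvBeats p q) then surv else surv ++ [p]) := rfl
    simp only [pvA_filter uniq, hfun2, hsurv]
    apply List.filter_congr
    intro p hpU
    have hmem : p ∈ PySem.List.sorted uniq (fun s => PySem.Str.len s) true ↔ p ∈ uniq :=
      (PySem.List.sorted_perm uniq (fun s => PySem.Str.len s) true).mem_iff
    by_cases h : pvUndom uniq p = true
    · rw [h]; symm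
      rw [List.contains_iff_mem, List.mem_filter]
      exact ⟨hmem.mpr hpU, h⟩
    · rw [Bool.not_eq_true] at h
      rw [h]; symm
      rw [Bool.eq_false_iff]
      intro hc
      rw [List.contains_iff_mem, List.mem_filter] at hc
      have := hc.2
      simp [h] at this
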